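-- pv_equiv track=rewrite | github.com/mat4ixOG/code | prep.py | countSubstriings
-- ===== SOURCE A (Python) =====
-- def countSubstriings(s:str,c:str)->int :
--     n = len(s)
--     count = 0
--     for i in range(n):
--         for subs in range(i+1,n+1):
--             if s[i] == c and s[subs-1] == c:
--                 count+=1
--
--     return count
-- ===== SOURCE B (Python) =====
-- def countSubstriings(s: str, c: str) -> int:
--     m = sum(1 for ch in s if ch == c)
--     return m * (m + 1) // 2
-- ===== Notes on version B (the rewrite author's own statement) =====
-- stated objective: faster
-- what changed: Replaces the quadratic double loop over index pairs by a single occurrence count m of c followed by the closed form m*(m+1)//2.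
import Mathlib
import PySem

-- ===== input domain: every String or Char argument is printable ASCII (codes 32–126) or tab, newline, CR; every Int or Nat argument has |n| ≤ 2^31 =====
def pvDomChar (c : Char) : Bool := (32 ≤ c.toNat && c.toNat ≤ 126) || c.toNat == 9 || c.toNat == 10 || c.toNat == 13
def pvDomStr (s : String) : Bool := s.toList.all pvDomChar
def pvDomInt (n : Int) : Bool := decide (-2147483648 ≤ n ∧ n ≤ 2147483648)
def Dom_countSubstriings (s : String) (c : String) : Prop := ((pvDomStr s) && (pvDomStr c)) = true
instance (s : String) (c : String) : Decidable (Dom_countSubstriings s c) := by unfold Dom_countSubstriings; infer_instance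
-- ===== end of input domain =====

-- B replaces A's quadratic double loop over index pairs by a single count of c's occurrences
-- and the closed form m*(m+1)//2 (objective: faster, asymptotic O(n^2) → O(n)).

-- ===== PORT A =====
def countSubstriings (s : String) (c : String) : Int :=
  let cs := s.toList
  let n : Int := (cs.length : Int)
  (PySem.List.pyRange 0 n 1).foldl (fun count i =>
    (PySem.List.pyRange (i + 1) (n + 1) 1).foldl (fun count subs =>
      if [PySem.List.pyGetD cs i ' '] = c.toList ∧
         [PySem.List.pyGetD cs (subs - 1) ' '] = c.toList
      then count + 1 else count) count) 0

-- ===== PORT B =====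
def countSubstriings_alt (s : String) (c : String) : Int :=
  let m : Int := (s.toList.countP (fun ch => decide ([ch] = c.toList)) : Int)
  PySem.Int.floordiv (m * (m + 1)) 2

-- ===== PRECONDITION & SPEC =====
def Spec_countSubstriings (s : String) (c : String) (out : Int) : Prop := out = countSubstriings_alt s c
instance (s : String) (c : String) (out : Int) : Decidable (Spec_countSubstriings s c out) := by unfold Spec_countSubstriings; infer_instance

-- ===== CLAIM (what is proved, stated in full; the proofs are below) =====
def Claim_equal_countSubstriings : Prop := ∀ (s : String) (c : String), Dom_countSubstriings s c → Spec_countSubstriings s c (countSubstriings s c)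

-- ===== LEMMAS AND PROOFS =====

-- The inner Python loop for one i adds (count of positions j ≥ i with p cs[j]) when p cs[i], else 0;
-- summing over i and inducting on cs gives the triangular closed form.
-- (m+1) + m*(m+1)/2 = (m+1)*(m+2)/2 over Nat
theorem pvTri (m : Nat) : (m + 1) + m * (m + 1) / 2 = (m + 1) * (m + 1 + 1) / 2 := by
  have d1 : 2 ∣ m * (m + 1) := (Nat.even_mul_succ_self m).two_dvd
  have d2 : 2 ∣ (m + 1) * (m + 1 + 1) := (Nat.even_mul_succ_self (m + 1)).two_dvd
  have h1 := Nat.div_mul_cancel d1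
  have h2 := Nat.div_mul_cancel d2
  have e : (m + 1) * (m + 1 + 1) = m * (m + 1) + 2 * (m + 1) := by ring
  omega

theorem pvTriangle (p : Char → Bool) (cs : List Char) :
    ((List.range cs.length).map
      (fun i => if p (cs.getD i ' ') then (cs.drop i).countP p else 0)).sum
    = cs.countP p * (cs.countP p + 1) / 2 := by
  induction cs with
  | nil => simp
  | cons ch t ih =>
    rw [show (ch :: t).length = t.length + 1 from rfl, List.range_succ_eq_map]
    simp only [List.map_cons, List.map_map, List.sum_cons, Function.comp_def,
      List.getD_cons_succ, List.drop_succ_cons, List.getD_cons_zero, List.drop_zero]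
    rw [ih, List.countP_cons]
    by_cases h : p ch
    · simp only [h, if_pos]
      exact pvTri (t.countP p)
    · simp [h]

theorem countSubstriings_eq (s c : String) :
    countSubstriings s c = countSubstriings_alt s c := by
  unfold countSubstriings countSubstriings_alt
  set cs := s.toList with hcs
  set p : Char → Bool := fun ch => decide ([ch] = c.toList) with hp
  -- inner loop: a counting fold
  have hinner : ∀ (i count : Int),
      (PySem.List.pyRange (i + 1) ((cs.length : Int) + 1) 1).foldl (fun count subs =>
        if [PySem.List.pyGetD cs i ' '] = c.toList ∧
           [PySem.List.pyGetD cs (subs - 1) ' '] = c.toList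
        then count + 1 else count) count
      = count + ((PySem.List.pyRange (i + 1) ((cs.length : Int) + 1) 1).countP
          (fun subs => decide ([PySem.List.pyGetD cs i ' '] = c.toList ∧
            [PySem.List.pyGetD cs (subs - 1) ' '] = c.toList)) : Int) := by
    intro i count
    exact PySem.List.foldl_ite_add_one _ _ _
  simp only [hinner]
  rw [PySem.List.foldl_add (g := fun i =>
    ((PySem.List.pyRange (i + 1) ((cs.length : Int) + 1) 1).countP
      (fun subs => decide ([PySem.List.pyGetD cs i ' '] = c.toList ∧
        [PySem.List.pyGetD cs (subs - 1) ' '] = c.toList)) : Int))]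
  rw [zero_add]
  -- rewrite the outer range as a mapped Nat range
  rw [PySem.List.pyRange_zero_natCast, List.map_map]
  -- pointwise: the i-th summand is the structural one
  have hpt : ∀ k ∈ List.range cs.length,
      ((fun i => ((PySem.List.pyRange (i + 1) ((cs.length : Int) + 1) 1).countP
          (fun subs => decide ([PySem.List.pyGetD cs i ' '] = c.toList ∧
            [PySem.List.pyGetD cs (subs - 1) ' '] = c.toList)) : Int)) ∘ (fun k : Nat => (k : Int))) k
      = ((if p (cs.getD k ' ') then (cs.drop k).countP p else 0 : Nat) : Int) := by
    intro k hk
    rw [List.mem_range] at hk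
    simp only [Function.comp_apply, PySem.List.pyGetD_natCast, List.getD_eq_getElem?_getD]
    by_cases hi : [cs[k]?.getD ' '] = c.toList
    · -- the first conjunct holds; count the matches of the second over the shifted range
      rw [hp]
      simp only [hi, true_and]
      congr 1
      -- pyRange (k+1) (n+1) 1 = (range (n-k)).map (fun t => (k+1)+t)
      have hr : PySem.List.pyRange ((k : Int) + 1) ((cs.length : Int) + 1) 1
          = (List.range (cs.length - k)).map (fun t : Nat => ((k : Int) + 1 + (t : Int))) := by
        rw [PySem.List.pyRange_one]
        have hn : ((cs.length : Int) + 1 - ((k : Int) + 1)).toNat = cs.length - k := by omega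
        rw [hn]
      -- cs.drop k as a map over the same index range
      have hdrop : cs.drop k
          = (List.range (cs.length - k)).map (fun t : Nat => PySem.List.pyGetD cs ((k : Int) + (t : Int)) ' ') := by
        have h0 : (0 : Int) ≤ (k : Int) := by positivity
        have h1 := PySem.List.map_pyGetD_pyRange' cs ' ' h0
        rw [PySem.List.pyRange_one, List.map_map] at h1
        have h2 : ((cs.length : Int) - (k : Int)).toNat = cs.length - k := by omega
        rw [h2] at h1
        simpa using h1.symm
      rw [hr, List.countP_map, hdrop, List.countP_map]
      apply List.countP_congr
      intro t _
      simp only [Function.comp_apply]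
      have he : (k : Int) + 1 + (t : Int) - 1 = (k : Int) + (t : Int) := by ring
      rw [he]
    · -- first conjunct false: both sides are zero
      rw [hp]
      simp [hi]
  rw [List.map_congr_left hpt]
  have hsum : ((List.range cs.length).map
      (fun k => ((if p (cs.getD k ' ') then (cs.drop k).countP p else 0 : Nat) : Int))).sum
      = (((List.range cs.length).map
        (fun k => (if p (cs.getD k ' ') then (cs.drop k).countP p else 0 : Nat))).sum : Int) := by
    rw [Nat.cast_list_sum, List.map_map]
    rfl
  rw [hsum, pvTriangle p cs]
  have hm : ((cs.countP p : Nat) : Int) * (((cs.countP p : Nat) : Int) + 1)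
      = (((cs.countP p * (cs.countP p + 1)) : Nat) : Int) := by push_cast; ring
  rw [hm]
  rw [show (2 : Int) = ((2 : Nat) : Int) from rfl, PySem.Int.floordiv_natCast]

-- ===== VERDICT (by name: the statement is the Claim_ definition above) =====
theorem countSubstriings_spec : Claim_equal_countSubstriings := by
  intro s c _
  unfold Spec_countSubstriings
  exact countSubstriings_eq s c
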